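-- pv_equiv track=rewrite | github.com/gosienkaaa/OSK-LABY | ODDANE_ZADANIE_4_RS_232py.py | koduj_rs232
-- ===== SOURCE A (Python) =====
-- def koduj_rs232(tekst):
--     strumien_bitow = ""
--     for znak in tekst:
--         kod_ascii = ord(znak) & 0xFF
--         bin_msb_lsb = format(kod_ascii, '08b')
--         bin_lsb_msb = bin_msb_lsb[::-1]
--         ramka = '0' + bin_lsb_msb + '11'
--         strumien_bitow += ramka
--     return strumien_bitow
-- ===== SOURCE B (Python) =====
-- def koduj_rs232(tekst):
--     czesci = []
--     for znak in tekst: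
--         kod = ord(znak) & 0xFF
--         bity = ""
--         for i in range(8):
--             bity += '1' if (kod >> i) & 1 else '0'
--         czesci.append('0' + bity + '11')
--     return ''.join(czesci)
-- ===== Notes on version B (the rewrite author's own statement) =====
-- stated objective: alternative
-- what changed: Per character, B extracts the 8 data bits LSB-first with an explicit shift-and-mask loop and joins frames collected in a list, instead of A's MSB-first format-to-binary-string plus slice-reversal and string concatenation.
import Mathlib
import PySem

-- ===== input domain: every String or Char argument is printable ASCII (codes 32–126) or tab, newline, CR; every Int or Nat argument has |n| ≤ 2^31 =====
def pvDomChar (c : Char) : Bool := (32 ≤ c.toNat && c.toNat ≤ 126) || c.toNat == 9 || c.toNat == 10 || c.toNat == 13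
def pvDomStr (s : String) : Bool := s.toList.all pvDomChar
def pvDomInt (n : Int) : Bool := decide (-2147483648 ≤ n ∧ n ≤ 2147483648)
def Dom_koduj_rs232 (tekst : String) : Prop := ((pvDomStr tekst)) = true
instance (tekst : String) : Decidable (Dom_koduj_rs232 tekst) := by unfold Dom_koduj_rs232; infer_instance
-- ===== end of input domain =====

-- B replaces A's format-to-binary-string + slice-reversal + string concatenation by an explicit
-- LSB-first shift-and-mask bit loop and a join over collected frames (objective: alternative).

-- ===== PORT A =====
-- format(kod_ascii, '08b'): 8 binary digits MSB-first; exact for kod < 256 (guaranteed by the & 0xFF mask)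
def pvFmt08b (k : Nat) : String :=
  String.mk ((List.range 8).map (fun i => if (k >>> (7 - i)) &&& 1 == 1 then '1' else '0'))

def koduj_rs232 (tekst : String) : String :=
  tekst.toList.foldl (fun strumien_bitow znak =>
    let kod_ascii := znak.toNat &&& 0xFF
    let bin_msb_lsb := pvFmt08b kod_ascii
    -- bin_msb_lsb[::-1]: exact string reversal
    let bin_lsb_msb := String.mk bin_msb_lsb.toList.reverse
    let ramka := "0" ++ bin_lsb_msb ++ "11"
    strumien_bitow ++ ramka) ""

-- ===== PORT B =====
def koduj_rs232_alt (tekst : String) : String :=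
  let czesci := tekst.toList.foldl (fun czesci znak =>
    let kod := znak.toNat &&& 0xFF
    let bity := (List.range 8).foldl
      (fun bity i => bity ++ (if (kod >>> i) &&& 1 == 1 then "1" else "0")) ""
    czesci ++ ["0" ++ bity ++ "11"]) ([] : List String)
  String.join czesci

-- ===== PRECONDITION & SPEC =====
def Spec_koduj_rs232 (tekst : String) (out : String) : Prop := out = koduj_rs232_alt tekst
instance (tekst : String) (out : String) : Decidable (Spec_koduj_rs232 tekst out) := by unfold Spec_koduj_rs232; infer_instance

-- ===== CLAIM (what is proved, stated in full; the proofs are below) =====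
def Claim_equal_koduj_rs232 : Prop := ∀ (tekst : String), Dom_koduj_rs232 tekst → Spec_koduj_rs232 tekst (koduj_rs232 tekst)

-- ===== LEMMAS AND PROOFS =====

-- the per-character frame, as A builds it
def pvFrameA (k : Nat) : String := "0" ++ String.mk (pvFmt08b k).toList.reverse ++ "11"

-- the per-character frame, as B builds it
def pvFrameB (k : Nat) : String :=
  "0" ++ (List.range 8).foldl (fun b i => b ++ (if (k >>> i) &&& 1 == 1 then "1" else "0")) "" ++ "11"

theorem pvFrame_eq (k : Nat) : pvFrameA k = pvFrameB k := by
  simp only [pvFrameA, pvFrameB, pvFmt08b, List.range_succ, List.range_zero, List.map, List.foldl,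
    List.nil_append, List.cons_append]
  apply String.ext
  simp [String.toList_append]
  split_ifs <;> rfl

theorem pvJoin_foldl (l : List String) (a : String) :
    l.foldl (fun r s => r ++ s) a = a ++ String.join l := by
  induction l generalizing a with
  | nil => simp [String.join]
  | cons x t ih =>
      show List.foldl _ (a ++ x) t = a ++ String.join (x :: t)
      rw [ih, show String.join (x :: t) = List.foldl (fun r s => r ++ s) ("" ++ x) t from rfl,
        ih ("" ++ x)]
      simp [String.append_assoc]

theorem pvJoin_cons (x : String) (l : List String) :
    String.join (x :: l) = x ++ String.join l := by
  show List.foldl _ ("" ++ x) l = _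
  rw [pvJoin_foldl]
  simp

theorem pvJoin_snoc (l : List String) (x : String) :
    String.join (l ++ [x]) = String.join l ++ x := by
  induction l with
  | nil => simp [String.join]
  | cons y t ih => rw [List.cons_append, pvJoin_cons, ih, pvJoin_cons, String.append_assoc]

theorem pvA_eq (l : List Char) (s : String) :
    l.foldl (fun strumien znak =>
      strumien ++ ("0" ++ String.mk (pvFmt08b (znak.toNat &&& 0xFF)).toList.reverse ++ "11")) s
      = s ++ String.join (l.map (fun znak => pvFrameA (znak.toNat &&& 0xFF))) := by
  induction l generalizing s with
  | nil => simp [String.join]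
  | cons c t ih =>
      simp only [List.foldl_cons, List.map_cons, pvJoin_cons, ih]
      simp [pvFrameA, String.append_assoc]

theorem pvB_eq (l : List Char) (acc : List String) :
    String.join (l.foldl (fun czesci znak =>
      czesci ++ ["0" ++ (List.range 8).foldl
        (fun b i => b ++ (if (znak.toNat &&& 0xFF) >>> i &&& 1 == 1 then "1" else "0")) "" ++ "11"]) acc)
      = String.join acc ++ String.join (l.map (fun znak => pvFrameB (znak.toNat &&& 0xFF))) := by
  induction l generalizing acc with
  | nil => simp [String.join]
  | cons c t ih =>
      simp only [List.foldl_cons, List.map_cons, pvJoin_cons, ih, pvJoin_snoc]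
      simp [pvFrameB, String.append_assoc]

-- ===== VERDICT (by name: the statement is the Claim_ definition above) =====
theorem koduj_rs232_spec : Claim_equal_koduj_rs232 := by
  intro tekst _
  show koduj_rs232 tekst = koduj_rs232_alt tekst
  unfold koduj_rs232 koduj_rs232_alt
  dsimp only
  rw [pvA_eq, pvB_eq]
  rw [show String.join ([] : List String) = "" from rfl, String.empty_append, String.empty_append]
  exact congrArg String.join (List.map_congr_left fun c _ => pvFrame_eq _)
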